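-- pv_equiv track=rewrite | github.com/EunjiYi/python_project-practice | 201028_recursive/swea_5203_베이비진게임_solution.py | check
-- ===== SOURCE A (Python) =====
-- def check(arr): # arr에 run이나 triplet이 있으면 True, 없으면 False
--     # run 검사
--     # triplet인지 검사
--     for i in range(len(arr)):
--         if i < len(arr) - 2 and arr[i] > 0:
--             if arr[i + 1] > 0 and arr[i + 2] > 0:
--                 return True
--         if arr[i] == 3:
--             return True
--
--     return False
-- ===== SOURCE B (Python) =====
-- def check(arr):
--     streak = 0
--     for v in arr:
--         if v == 3:
--             return True
--         streak = streak + 1 if v > 0 else 0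
--         if streak == 3:
--             return True
--     return False
-- ===== Notes on version B (the rewrite author's own statement) =====
-- stated objective: simpler
-- what changed: Replaces the three-index lookahead window (arr[i], arr[i+1], arr[i+2] with an i < len-2 bound) by a single pass that maintains a running streak counter of consecutive positive values, returning True when the streak reaches 3 or a value equals 3.
import Mathlib
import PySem

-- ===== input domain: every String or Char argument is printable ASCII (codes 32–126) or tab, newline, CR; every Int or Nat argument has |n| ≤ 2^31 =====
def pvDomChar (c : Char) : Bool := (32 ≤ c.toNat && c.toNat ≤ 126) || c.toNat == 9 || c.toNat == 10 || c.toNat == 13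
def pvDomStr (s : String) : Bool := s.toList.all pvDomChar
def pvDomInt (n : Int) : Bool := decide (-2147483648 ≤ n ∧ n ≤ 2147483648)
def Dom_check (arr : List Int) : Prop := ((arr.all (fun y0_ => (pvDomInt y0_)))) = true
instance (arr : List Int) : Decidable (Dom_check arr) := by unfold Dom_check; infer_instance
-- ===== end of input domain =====

-- B replaces A's three-index lookahead window by a running streak counter over one pass; return value only, no side effects.

-- ===== PORT A =====
-- A's 'for i in range(len(arr))' loop with early returns; arr[i] is always in range here.
def checkA_loop (arr : List Int) : List Int → Bool
  | [] => false
  | i :: rest =>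
    let next : Bool :=
      if (PySem.List.pyGet? arr i).getD 0 = 3 then true else checkA_loop arr rest
    if i < (arr.length : Int) - 2 ∧ (PySem.List.pyGet? arr i).getD 0 > 0 then
      if (PySem.List.pyGet? arr (i + 1)).getD 0 > 0 ∧ (PySem.List.pyGet? arr (i + 2)).getD 0 > 0 then
        true
      else next
    else next

def check (arr : List Int) : Bool :=
  checkA_loop arr (PySem.List.pyRange 0 arr.length 1)

-- ===== PORT B =====
def checkB_loop : List Int → Int → Bool
  | [], _ => false
  | v :: rest, streak =>
    if v = 3 then true
    else
      let streak' : Int := if v > 0 then streak + 1 else 0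
      if streak' = 3 then true else checkB_loop rest streak'

def check_alt (arr : List Int) : Bool := checkB_loop arr 0

-- ===== PRECONDITION & SPEC =====
def Spec_check (arr : List Int) (out : Bool) : Prop := out = check_alt arr
instance (arr : List Int) (out : Bool) : Decidable (Spec_check arr out) := by unfold Spec_check; infer_instance

-- ===== CLAIM (what is proved, stated in full; the proofs are below) =====
def Claim_equal_check : Prop := ∀ (arr : List Int), Dom_check arr → Spec_check arr (check arr)

-- ===== LEMMAS AND PROOFS =====

-- Reference predicate: the list contains a 3, or three consecutive positive values.
def specA : List Int → Bool
  | [] => false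
  | [a] => decide (a = 3)
  | [a, b] => decide (a = 3) || decide (b = 3)
  | a :: b :: c :: rest =>
    ((decide (a > 0) && decide (b > 0) && decide (c > 0)) || decide (a = 3)) || specA (b :: c :: rest)

-- carryB l s : the streak carried in is s and the next (3 - s) values of l are all positive.
def carryB : List Int → Int → Bool
  | [], s => decide (3 ≤ s)
  | a :: r, s => if 3 ≤ s then true else decide (a > 0) && carryB r (s + 1)

theorem carryB_of_ge (l : List Int) (s : Int) (h : 3 ≤ s) : carryB l s = true := by
  cases l <;> simp [carryB, h]

theorem specA_cons (a : Int) (rest : List Int) :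
    specA (a :: rest) = (((decide (a = 3)) || (decide (a > 0) && carryB rest 1)) || specA rest) := by
  match rest with
  | [] => simp [specA, carryB]
  | [b] =>
    simp only [specA, carryB]
    norm_num
  | b :: c :: r =>
    simp only [specA, carryB]
    rw [carryB_of_ge r (1 + 1 + 1) (by omega)]
    norm_num
    cases hb : decide (b > 0) <;> cases hc : decide (c > 0) <;>
      cases ha : decide (a > 0) <;> cases h3 : decide (a = 3) <;> simp_all

theorem carryB_one_to_two (l : List Int) (h : carryB l 1 = true) : carryB l 2 = true := by
  cases l with
  | nil => simp [carryB] at h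
  | cons a r =>
    simp only [carryB] at *
    rw [carryB_of_ge r (2 + 1) (by omega)]
    norm_num at *
    exact h.1

theorem carryB_zero_spec (l : List Int) (h : carryB l 0 = true) : specA l = true := by
  match l with
  | [] => simp [carryB] at h
  | [a] => simp [carryB] at h
  | [a, b] => simp [carryB] at h
  | a :: b :: c :: r =>
    simp only [carryB] at h
    norm_num at h
    simp [specA, h.1, h.2.1, h.2.2.1]

theorem checkB_loop_eq (l : List Int) : ∀ s : Int, 0 ≤ s → s ≤ 2 →
    checkB_loop l s = (specA l || carryB l s) := by
  induction l with
  | nil =>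
    intro s _ h2
    simp [checkB_loop, specA, carryB]; omega
  | cons v rest ih =>
    intro s h0 h2
    by_cases hv3 : v = 3
    · subst hv3
      have hsp : specA (3 :: rest) = true := by
        rw [specA_cons]; simp
      simp [checkB_loop, hsp]
    · by_cases hvp : v > 0
      · by_cases hs2 : s = 2
        · subst hs2
          simp only [checkB_loop, if_neg hv3, if_pos hvp]
          rw [if_pos (by omega : (2:Int) + 1 = 3)]
          have hc : carryB (v :: rest) 2 = true := by
            simp only [carryB]
            rw [carryB_of_ge rest (2 + 1) (by omega)]
            simp [hvp]
          rw [hc]; simp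
        · simp only [checkB_loop, if_neg hv3, if_pos hvp]
          rw [if_neg (by omega : ¬ s + 1 = 3)]
          rw [ih (s + 1) (by omega) (by omega)]
          rw [specA_cons]
          have hcar : carryB (v :: rest) s = (decide (v > 0) && carryB rest (s + 1)) := by
            simp [carryB, if_neg (by omega : ¬ (3:Int) ≤ s)]
          rw [hcar]
          simp only [decide_eq_true hvp, decide_eq_false hv3, Bool.true_and, Bool.false_or]
          have hs01 : s = 0 ∨ s = 1 := by omega
          rcases hs01 with h | h <;> subst h
          · cases h1 : carryB rest (0 + 1) <;> cases hs : specA rest <;> simp_all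
          · cases h1 : carryB rest 1 with
            | false => simp
            | true =>
              have h2' := carryB_one_to_two rest h1
              rw [show (1:Int) + 1 = 2 from by norm_num, h2']
              simp
      · simp only [checkB_loop, if_neg hv3, if_neg hvp]
        rw [if_neg (by omega : ¬ (0:Int) = 3)]
        rw [ih 0 (by omega) (by omega)]
        rw [specA_cons]
        have hcar : carryB (v :: rest) s = false := by
          simp [carryB, if_neg (by omega : ¬ (3:Int) ≤ s), hvp]
        rw [hcar]
        simp only [decide_eq_false hvp, decide_eq_false hv3, Bool.false_and, Bool.false_or,
          Bool.or_false]
        cases h0c : carryB rest 0 with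
        | false => simp
        | true => rw [carryB_zero_spec rest h0c]; simp

theorem check_alt_eq_specA (arr : List Int) : check_alt arr = specA arr := by
  unfold check_alt
  rw [checkB_loop_eq arr 0 (by omega) (by omega)]
  cases h : carryB arr 0 with
  | false => simp
  | true => rw [carryB_zero_spec arr h]; simp

theorem checkA_loop_eq (arr : List Int) : ∀ (tail : List Int) (i : Nat),
    arr.drop i = tail →
    checkA_loop arr (PySem.List.pyRange i arr.length 1) = specA tail := by
  intro tail
  induction tail with
  | nil =>
    intro i hd
    have hlen : arr.length ≤ i := by
      have h := congrArg List.length hd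
      simp at h; omega
    rw [PySem.List.pyRange_one_eq_nil (by exact_mod_cast hlen)]
    simp [checkA_loop, specA]
  | cons a rest ih =>
    intro i hd
    have hi : i < arr.length := by
      by_contra h
      rw [List.drop_eq_nil_of_le (by omega)] at hd
      exact List.cons_ne_nil a rest hd.symm
    have hrest : arr.drop (i + 1) = rest := by
      have h1 : arr.drop (i + 1) = (arr.drop i).drop 1 := by rw [List.drop_drop]
      rw [h1, hd]; simp
    have hlen : arr.length = i + 1 + rest.length := by
      have h := congrArg List.length hd
      simp at h; omega
    have hga : (PySem.List.pyGet? arr (i : Int)).getD 0 = a := by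
      rw [PySem.List.pyGet?_natCast]
      have h : arr[i]? = some a := by
        have h2 : (arr.drop i)[0]? = arr[i + 0]? := List.getElem?_drop
        rw [hd] at h2; simpa using h2.symm
      simp [h]
    have hrec : checkA_loop arr (PySem.List.pyRange ((i:Int)+1) arr.length 1) = specA rest := by
      have hcast : ((i:Int) + 1) = ((i + 1 : Nat) : Int) := by push_cast; ring
      rw [hcast]
      exact ih (i + 1) hrest
    rw [PySem.List.pyRange_one_cons (by exact_mod_cast hi)]
    simp only [checkA_loop, hga, hrec]
    match rest, hrest, hlen with
    | [], hrest, hlen =>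
      have hLen : arr.length = i + 1 := by simpa using hlen
      have hcnot : ¬ ((i:Int) < (arr.length : Int) - 2 ∧ a > 0) := by
        rintro ⟨h1, _⟩; omega
      simp only [if_neg hcnot, specA]
      by_cases h3 : a = 3 <;> simp [h3]
    | [b], hrest, hlen =>
      have hLen : arr.length = i + 2 := by simpa [Nat.add_assoc] using hlen
      have hcnot : ¬ ((i:Int) < (arr.length : Int) - 2 ∧ a > 0) := by
        rintro ⟨h1, _⟩; omega
      simp only [if_neg hcnot, specA]
      by_cases h3 : a = 3 <;> simp [h3]
    | b :: c :: r, hrest, hlen =>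
      have hgb : (PySem.List.pyGet? arr ((i:Int) + 1)).getD 0 = b := by
        have hcast : ((i:Int) + 1) = ((i + 1 : Nat) : Int) := by push_cast; ring
        rw [hcast, PySem.List.pyGet?_natCast]
        have h : arr[i+1]? = some b := by
          have h2 : (arr.drop (i+1))[0]? = arr[(i + 1) + 0]? := List.getElem?_drop
          rw [hrest] at h2; simpa using h2.symm
        simp [h]
      have hgc : (PySem.List.pyGet? arr ((i:Int) + 2)).getD 0 = c := by
        have hcast : ((i:Int) + 2) = ((i + 2 : Nat) : Int) := by push_cast; ring
        rw [hcast, PySem.List.pyGet?_natCast]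
        have hdrop : arr.drop (i + 2) = c :: r := by
          have h1 : arr.drop (i + 2) = (arr.drop (i+1)).drop 1 := by rw [List.drop_drop]
          rw [h1, hrest]; simp
        have h : arr[i+2]? = some c := by
          have h2 : (arr.drop (i+2))[0]? = arr[(i + 2) + 0]? := List.getElem?_drop
          rw [hdrop] at h2; simpa using h2.symm
        simp [h]
      have hLen : arr.length = i + 3 + r.length := by
        simp at hlen; omega
      have hlt : (i:Int) < (arr.length : Int) - 2 := by omega
      simp only [hgb, hgc]
      by_cases hap : a > 0
      · rw [if_pos ⟨hlt, hap⟩]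
        by_cases hbp : b > 0
        · by_cases hcp : c > 0
          · rw [if_pos ⟨hbp, hcp⟩]
            simp [specA, hap, hbp, hcp]
          · rw [if_neg (by tauto : ¬ (b > 0 ∧ c > 0))]
            by_cases h3 : a = 3 <;>
              cases hs : specA (b :: c :: r) <;> simp_all [specA]
        · rw [if_neg (by tauto : ¬ (b > 0 ∧ c > 0))]
          by_cases h3 : a = 3 <;>
            cases hs : specA (b :: c :: r) <;> simp_all [specA]
      · rw [if_neg (by tauto : ¬ ((i:Int) < (arr.length : Int) - 2 ∧ a > 0))]
        by_cases h3 : a = 3 <;>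
          cases hs : specA (b :: c :: r) <;> simp_all [specA]

-- ===== VERDICT (by name: the statement is the Claim_ definition above) =====
theorem check_spec : Claim_equal_check := by
  intro arr _
  unfold Spec_check
  rw [check_alt_eq_specA]
  unfold check
  have := checkA_loop_eq arr arr 0 (by simp)
  simpa using this
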